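-- pv_equiv track=rewrite | github.com/MVC0712/PLC_Web | loop.py | decimal_to_hex_16
-- ===== SOURCE A (Python) =====
-- def decimal_to_hex_16(decimal_number):
--     hexadecimal_number = ""
--     while decimal_number > 0:
--         remainder = decimal_number % 16
--         hexadecimal_digit = hex(remainder)[2:]
--         hexadecimal_number = hexadecimal_digit + hexadecimal_number
--         decimal_number = decimal_number // 16
--     return changepos(insert_space(hexadecimal_number))
--
-- def insert_space(string):
--     new_string = ""
--     for i in range(0, len(string), 2):
--         new_string += string[i:i + 2]
--         if i + 2 < len(string):
--             new_string += " "
--     return new_string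
--
-- def changepos(string):
--     words = string.split(" ")
--     word = words[len(words) - 1]
--     words.remove(word)
--     words.insert(0, word)
--     new_string = " ".join(words)
--     return new_string
-- ===== SOURCE B (Python) =====
-- _HEX = "0123456789abcdef"
--
-- def decimal_to_hex_16(decimal_number):
--     # count hex digits of the number
--     digits = 0
--     t = decimal_number
--     while t > 0:
--         digits += 1
--         t = t // 16
--     # extract byte-sized two-character groups directly, low to high;
--     # if the digit count is odd, the lowest group is a single digit
--     n = decimal_number
--     chunks = []
--     if digits % 2 == 1:
--         chunks.append(_HEX[n % 16])
--         n = n // 16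
--     while n > 0:
--         chunks.append(_HEX[n // 16 % 16] + _HEX[n % 16])
--         n = n // 256
--     # lowest group first, then the remaining groups from high to low
--     return " ".join(chunks[:1] + chunks[1:][::-1])
-- ===== Notes on version B (the rewrite author's own statement) =====
-- stated objective: alternative
-- what changed: B never builds the hex string at all: it counts the hex digits, peels one low digit if the count is odd, then extracts byte-sized two-character groups directly by repeated division (low-to-high) and emits them as chunks[:1] + chunks[1:][::-1], replacing A's digit-by-digit string build, spaced-string insert_space and split/remove/insert changepos passes.
-- intended difference: When the last two-character hex group also occurs earlier with a different group in between (e.g. 0xaabbaa), A's words.remove(word) deletes the earlier copy so the last group is not moved (A returns 'aa bb aa'), while B puts the true last group first ('aa aa bb'), which is the rotation changepos is meant to perform. — e.g. on decimal_to_hex_16(11189162): A returns "aa bb aa", B returns "aa aa bb"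
import Mathlib
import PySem

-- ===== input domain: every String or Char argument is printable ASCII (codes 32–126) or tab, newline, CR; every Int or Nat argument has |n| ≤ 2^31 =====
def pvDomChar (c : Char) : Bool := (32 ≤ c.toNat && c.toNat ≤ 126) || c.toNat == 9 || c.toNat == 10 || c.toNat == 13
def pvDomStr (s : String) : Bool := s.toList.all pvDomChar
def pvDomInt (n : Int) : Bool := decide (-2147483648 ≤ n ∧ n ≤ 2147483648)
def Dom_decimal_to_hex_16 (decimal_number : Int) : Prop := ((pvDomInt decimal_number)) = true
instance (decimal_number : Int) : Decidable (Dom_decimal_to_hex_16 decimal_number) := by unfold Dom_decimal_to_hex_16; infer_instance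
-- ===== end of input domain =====

-- B skips the hex string entirely: it counts digits, then extracts byte-sized two-character groups directly and reorders them in the final join; on the duplicate-last-group corner (see D_) B rotates
-- where A's remove-by-value does not.

-- ===== PORT A =====
-- hex(r) hand-ported: for the only values reached (r = n % 16, 0 ≤ r < 16) hex(r) is "0x" ++ one digit (exact there)
def pvHexA (r : Int) : List Char :=
  ['0', 'x',
   if r = 0 then '0' else if r = 1 then '1' else if r = 2 then '2' else if r = 3 then '3'
   else if r = 4 then '4' else if r = 5 then '5' else if r = 6 then '6' else if r = 7 then '7'
   else if r = 8 then '8' else if r = 9 then '9' else if r = 10 then 'a' else if r = 11 then 'b'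
   else if r = 12 then 'c' else if r = 13 then 'd' else if r = 14 then 'e' else 'f']

-- the while loop; fuel only makes the recursion structural (n.toNat + 1 iterations always suffice)
def pvLoopA : Nat → Int → List Char → List Char
  | 0, _, hx => hx
  | fuel + 1, n, hx =>
    if 0 < n then
      pvLoopA fuel (PySem.Int.floordiv n 16)
        (PySem.List.slice (pvHexA (PySem.Int.mod n 16)) (some 2) none ++ hx)
    else hx

def pvInsertSpace (s : List Char) : List Char :=
  (PySem.List.pyRange 0 (s.length : Int) 2).foldl
    (fun acc i =>
      let acc := acc ++ PySem.List.slice s (some i) (some (i + 2))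
      if i + 2 < (s.length : Int) then acc ++ [' '] else acc) []

def pvChangepos (s : List Char) : List Char :=
  match PySem.Chars.split? s [' '] with
  | none => []  -- unreachable: the separator " " is nonempty
  | some words =>
    let word := (PySem.List.pyGet? words ((words.length : Int) - 1)).getD []
    match PySem.List.remove? words word with
    | none => []  -- unreachable: word ∈ words
    | some words2 => PySem.Chars.join [' '] (PySem.List.insert words2 0 word)

def decimal_to_hex_16 (decimal_number : Int) : String :=
  String.ofList (pvChangepos (pvInsertSpace (pvLoopA (decimal_number.toNat + 1) decimal_number [])))

-- ===== PORT B =====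
def pvHexTable : List Char :=
  ['0', '1', '2', '3', '4', '5', '6', '7', '8', '9', 'a', 'b', 'c', 'd', 'e', 'f']

-- Source B's digit-count while loop; fuel only makes the recursion structural
def pvCountLoop : Nat → Int → Int → Int
  | 0, _, d => d
  | fuel + 1, t, d =>
    if 0 < t then pvCountLoop fuel (PySem.Int.floordiv t 16) (d + 1) else d

-- Source B's while loop appending byte-sized two-character chunks low-to-high; fuel as above
def pvByteLoop : Nat → Int → List (List Char) → List (List Char)
  | 0, _, chunks => chunks
  | fuel + 1, n, chunks =>
    if 0 < n then
      pvByteLoop fuel (PySem.Int.floordiv n 256)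
        (chunks ++ [(PySem.List.pyGet? pvHexTable (PySem.Int.mod (PySem.Int.floordiv n 16) 16)).toList
          ++ (PySem.List.pyGet? pvHexTable (PySem.Int.mod n 16)).toList])
    else chunks

def decimal_to_hex_16_alt (decimal_number : Int) : String :=
  let digits := pvCountLoop (decimal_number.toNat + 1) decimal_number 0
  let chunks0 : List (List Char) :=
    if PySem.Int.mod digits 2 = 1
    then [(PySem.List.pyGet? pvHexTable (PySem.Int.mod decimal_number 16)).toList]
    else []
  let n1 := if PySem.Int.mod digits 2 = 1
    then PySem.Int.floordiv decimal_number 16 else decimal_number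
  let chunks := pvByteLoop (decimal_number.toNat + 1) n1 chunks0
  String.ofList (PySem.Chars.join [' ']
    (PySem.List.slice chunks none (some 1) ++
      ((PySem.List.slice? (PySem.List.slice chunks (some 1) none) none none (-1)).getD [])))

-- ===== PRECONDITION & SPEC =====
-- helpers for D_ (independent of both ports): the hex digits of n and their two-character groups
def pvHexD (m : Nat) : List Char := if m = 0 then [] else Nat.toDigits 16 m

def pvChunksD : List Char → List (List Char)
  | [] => []
  | [a] => [[a]]
  | a :: b :: t => [a, b] :: pvChunksD t

def pvDCheck (c : List (List Char)) : Bool :=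
  (c.dropLast.dropWhile (· != c.getLast?.getD [])).any (· != c.getLast?.getD [])

-- When the last two-character hex group also occurs earlier with a different group in between, A's
-- changepos removes that EARLIER copy and so fails to rotate (returning the groups unrotated),
-- while B moves the genuine last group to the front, which is the rotation changepos intends.
def D_decimal_to_hex_16 (decimal_number : Int) : Prop :=
  pvDCheck (pvChunksD (pvHexD decimal_number.toNat)) = true
instance (decimal_number : Int) : Decidable (D_decimal_to_hex_16 decimal_number) := by
  unfold D_decimal_to_hex_16; infer_instance

def Spec_decimal_to_hex_16 (decimal_number : Int) (out : String) : Prop :=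
  ¬ D_decimal_to_hex_16 decimal_number → out = decimal_to_hex_16_alt decimal_number
instance (decimal_number : Int) (out : String) : Decidable (Spec_decimal_to_hex_16 decimal_number out) := by
  unfold Spec_decimal_to_hex_16; infer_instance

def pvDiffWitness_decimal_to_hex_16 : Int := (11189162)  -- 0xaabbaa
def pvDiffWitnessOut_decimal_to_hex_16 : String × String := ("aa bb aa", "aa aa bb")

-- ===== CLAIM (what is proved, stated in full; the proofs are below) =====
def Claim_unchanged_decimal_to_hex_16 : Prop := ∀ (decimal_number : Int), Dom_decimal_to_hex_16 decimal_number → Spec_decimal_to_hex_16 decimal_number (decimal_to_hex_16 decimal_number)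
def Claim_changed_decimal_to_hex_16 : Prop := Dom_decimal_to_hex_16 (pvDiffWitness_decimal_to_hex_16) ∧ D_decimal_to_hex_16 (pvDiffWitness_decimal_to_hex_16) ∧ decimal_to_hex_16 (pvDiffWitness_decimal_to_hex_16) = pvDiffWitnessOut_decimal_to_hex_16.1 ∧ decimal_to_hex_16_alt (pvDiffWitness_decimal_to_hex_16) = pvDiffWitnessOut_decimal_to_hex_16.2 ∧ pvDiffWitnessOut_decimal_to_hex_16.1 ≠ pvDiffWitnessOut_decimal_to_hex_16.2
def Claim_exact_decimal_to_hex_16 : Prop := ∀ (decimal_number : Int), Dom_decimal_to_hex_16 decimal_number → D_decimal_to_hex_16 decimal_number → decimal_to_hex_16 decimal_number ≠ decimal_to_hex_16_alt decimal_number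

-- ===== LEMMAS AND PROOFS =====

-- fuelled form of pvHexD used by the loop invariants
def pvHexDigitsD : Nat → Nat → List Char
  | 0, _ => []
  | fuel + 1, m => if m = 0 then [] else pvHexDigitsD fuel (m / 16) ++ [Nat.digitChar (m % 16)]

theorem pv_toDigitsCore_eq : ∀ (fuel : Nat), ∀ (fuel' m : Nat) (rest : List Char), 0 < m →
    m < fuel → m < fuel' →
    Nat.toDigitsCore 16 fuel m rest = pvHexDigitsD fuel' m ++ rest := by
  intro fuel
  induction fuel with
  | zero => intro _ m _ h1 h2; omega
  | succ f ih =>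
    intro fuel' m rest h1 h2 h3
    match fuel', h3 with
    | f' + 1, _ =>
      rw [Nat.toDigitsCore]
      by_cases hq : m / 16 = 0
      · rw [if_pos hq]
        rw [pvHexDigitsD, if_neg (by omega), hq]
        have : pvHexDigitsD f' 0 = [] := by cases f' <;> simp [pvHexDigitsD]
        simp [this]
      · rw [if_neg hq]
        rw [ih f' (m / 16) _ (by omega) (by omega) (by omega)]
        rw [pvHexDigitsD, if_neg (by omega)]
        simp

theorem pv_hexD_eq (fuel m : Nat) (h : m < fuel) : pvHexD m = pvHexDigitsD fuel m := by
  by_cases hm : m = 0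
  · subst hm
    cases fuel with
    | zero => omega
    | succ f => simp [pvHexD, pvHexDigitsD]
  · rw [pvHexD, if_neg hm]
    unfold Nat.toDigits
    rw [pv_toDigitsCore_eq (m + 1) fuel m [] (by omega) (by omega) h]
    simp

theorem pv_mod16 (n : Int) (hn : 0 < n) : PySem.Int.mod n 16 = ((n.toNat % 16 : Nat) : Int) := by
  simp [PySem.Int.mod, Int.fmod_eq_emod]
  omega

theorem pv_div16 (n : Int) (hn : 0 < n) : PySem.Int.floordiv n 16 = ((n.toNat / 16 : Nat) : Int) := by
  simp [PySem.Int.floordiv, Int.fdiv_eq_ediv]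
  omega

theorem pv_div256 (n : Int) (hn : 0 < n) : PySem.Int.floordiv n 256 = ((n.toNat / 256 : Nat) : Int) := by
  simp [PySem.Int.floordiv, Int.fdiv_eq_ediv]
  omega

theorem pv_mod2_nat (k : Nat) : PySem.Int.mod ((k : Nat) : Int) 2 = ((k % 2 : Nat) : Int) := by
  simp [PySem.Int.mod, Int.fmod_eq_emod]

theorem pv_digitA (k : Nat) (hk : k < 16) :
    PySem.List.slice (pvHexA (k : Int)) (some 2) none = [Nat.digitChar k] := by
  interval_cases k <;> decide

theorem pv_digitB (k : Nat) (hk : k < 16) :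
    (PySem.List.pyGet? pvHexTable (k : Int)).toList = [Nat.digitChar k] := by
  interval_cases k <;> decide

theorem pv_loopA_eq (fuel : Nat) : ∀ (n : Int) (acc : List Char), n.toNat < fuel →
    pvLoopA fuel n acc = pvHexDigitsD fuel n.toNat ++ acc := by
  induction fuel with
  | zero => intro n acc h; omega
  | succ f ih =>
    intro n acc h
    by_cases hp : 0 < n
    · have hm : n.toNat % 16 < 16 := by omega
      have hnz : n.toNat ≠ 0 := by omega
      rw [pvLoopA, if_pos hp, pv_mod16 n hp, pv_div16 n hp, pv_digitA _ hm,
        ih _ _ (by simp; omega)]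
      simp [pvHexDigitsD, hnz]
      congr 1; omega
    · have h0 : n.toNat = 0 := by omega
      rw [pvLoopA, if_neg hp]
      simp [h0, pvHexDigitsD]

-- pvHexD's one-digit unfolding, and the digit-count recursion it gives
theorem pv_hexD_succ (m : Nat) (hm : m ≠ 0) :
    pvHexD m = pvHexD (m / 16) ++ [Nat.digitChar (m % 16)] := by
  rw [pv_hexD_eq (m + 1) m (by omega), pvHexDigitsD, if_neg hm,
    pv_hexD_eq m (m / 16) (Nat.div_lt_self (by omega) (by omega))]

theorem pv_hexD_zero : pvHexD 0 = [] := by simp [pvHexD]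

theorem pv_countLoop_eq (fuel : Nat) : ∀ (t d : Int), t.toNat < fuel →
    pvCountLoop fuel t d = d + ((pvHexD t.toNat).length : Int) := by
  induction fuel with
  | zero => intro t d h; omega
  | succ f ih =>
    intro t d h
    by_cases hp : 0 < t
    · have hnz : t.toNat ≠ 0 := by omega
      rw [pvCountLoop, if_pos hp, pv_div16 t hp, ih _ _ (by omega)]
      have htn : ((((t.toNat / 16 : Nat) : Int)).toNat) = t.toNat / 16 := by omega
      rw [htn, pv_hexD_succ t.toNat hnz]
      simp only [List.length_append, List.length_cons, List.length_nil]
      push_cast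
      ring
    · have h0 : t.toNat = 0 := by omega
      rw [pvCountLoop, if_neg hp]
      simp [h0, pv_hexD_zero]

theorem pv_chunksD_append_even : ∀ (xs ys : List Char), xs.length % 2 = 0 →
    pvChunksD (xs ++ ys) = pvChunksD xs ++ pvChunksD ys := by
  intro xs
  induction xs using pvChunksD.induct with
  | case1 => intro ys _; simp [pvChunksD]
  | case2 a => intro ys h; simp at h
  | case3 a b t ih =>
    intro ys h
    simp only [List.cons_append, pvChunksD]
    rw [ih ys (by simp only [List.length_cons] at h; omega)]

-- pvHexD's two-digit (byte) unfolding, for even digit counts ≥ 2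
theorem pv_hexD_byte (m : Nat) (hm : m ≠ 0) (hev : (pvHexD m).length % 2 = 0) :
    pvHexD m = pvHexD (m / 256) ++ [Nat.digitChar (m / 16 % 16), Nat.digitChar (m % 16)]
      ∧ m / 16 ≠ 0 ∧ (pvHexD (m / 256)).length % 2 = 0 := by
  have h1 := pv_hexD_succ m hm
  have hq : m / 16 ≠ 0 := by
    intro h0
    rw [h1, h0, pv_hexD_zero] at hev
    simp at hev
  have h2 := pv_hexD_succ (m / 16) hq
  have hdd : m / 16 / 16 = m / 256 := by
    rw [Nat.div_div_eq_div_mul]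
  rw [h2, hdd] at h1
  refine ⟨by simpa using h1, hq, ?_⟩
  have : (pvHexD m).length = (pvHexD (m / 256)).length + 2 := by
    rw [h1]; simp
  omega

theorem pv_byteLoop_eq (fuel : Nat) : ∀ (n : Int) (acc : List (List Char)), n.toNat < fuel →
    (pvHexD n.toNat).length % 2 = 0 →
    pvByteLoop fuel n acc = acc ++ (pvChunksD (pvHexD n.toNat)).reverse := by
  induction fuel with
  | zero => intro n acc h; omega
  | succ f ih =>
    intro n acc h hev
    by_cases hp : 0 < n
    · have hnz : n.toNat ≠ 0 := by omega
      obtain ⟨hform, hq, hev'⟩ := pv_hexD_byte n.toNat hnz hev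
      have hqpos : (0 : Int) < ((n.toNat / 16 : Nat) : Int) := by
        exact_mod_cast Nat.pos_of_ne_zero hq
      rw [pvByteLoop, if_pos hp, pv_div16 n hp, pv_mod16 n hp, pv_div256 n hp,
        pv_mod16 _ hqpos]
      rw [pv_digitB (n.toNat % 16) (by omega)]
      have htn : ((((n.toNat / 16 : Nat) : Int)).toNat % 16) = n.toNat / 16 % 16 := by
        omega
      rw [htn, pv_digitB (n.toNat / 16 % 16) (by omega)]
      have hfn : (((n.toNat / 256 : Nat) : Int)).toNat = n.toNat / 256 := by omega
      have hlt : (((n.toNat / 256 : Nat) : Int)).toNat < f := by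
        have := Nat.div_lt_self (Nat.pos_of_ne_zero hnz) (by omega : 1 < 256)
        omega
      rw [ih _ _ hlt (by rw [hfn]; exact hev')]
      rw [hfn, hform, pv_chunksD_append_even _ _ hev']
      simp [pvChunksD]
    · have h0 : n.toNat = 0 := by omega
      rw [pvByteLoop, if_neg hp]
      simp [h0, pv_hexD_zero, pvChunksD]

theorem pv_loopB_hex (n : Int) :
    pvHexDigitsD (n.toNat + 1) n.toNat = pvHexD n.toNat :=
  (pv_hexD_eq (n.toNat + 1) n.toNat (by omega)).symm

theorem pv_chunksD_ne_nil (t : List Char) (h : t ≠ []) : pvChunksD t ≠ [] := by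
  match t with
  | [a] => simp [pvChunksD]
  | a :: b :: r => simp [pvChunksD]

-- the final join's argument in B: head chunk first, then the rest reversed
theorem pv_slices_rotate (chunks : List (List Char)) :
    PySem.List.slice chunks none (some 1) ++
      ((PySem.List.slice? (PySem.List.slice chunks (some 1) none) none none (-1)).getD [])
    = chunks.take 1 ++ chunks.tail.reverse := by
  rw [PySem.List.slice?_none_none_neg_one, PySem.List.slice_from_one]
  have : PySem.List.slice chunks none (some ((1 : Nat) : Int)) = chunks.take 1 :=
    PySem.List.slice_to_natCast chunks 1
  simpa using this

-- B computes join (last-group :: dropLast) of the chunk list (same normal form as A's rotation)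
theorem pv_B_form (n : Int) (hne : pvHexDigitsD (n.toNat + 1) n.toNat ≠ []) :
    decimal_to_hex_16_alt n = String.ofList (PySem.Chars.join [' ']
      (((pvChunksD (pvHexDigitsD (n.toNat + 1) n.toNat)).getLast?.getD []) ::
        (pvChunksD (pvHexDigitsD (n.toNat + 1) n.toNat)).dropLast)) := by
  have hhd := pv_loopB_hex n
  rw [hhd] at hne ⊢
  have hnz : n.toNat ≠ 0 := by intro h0; rw [h0, pv_hexD_zero] at hne; exact hne rfl
  have hnp : 0 < n := by omega
  unfold decimal_to_hex_16_alt
  dsimp only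
  rw [pv_countLoop_eq _ _ _ (by omega)]
  rw [show ((0 : Int) + ((pvHexD n.toNat).length : Int)) = (((pvHexD n.toNat).length : Nat) : Int) by omega]
  rw [pv_mod2_nat]
  by_cases hodd : (pvHexD n.toNat).length % 2 = 1
  · rw [if_pos (by exact_mod_cast hodd), if_pos (by exact_mod_cast hodd)]
    rw [pv_mod16 n hnp, pv_digitB (n.toNat % 16) (by omega), pv_div16 n hnp]
    have hfn : (((n.toNat / 16 : Nat) : Int)).toNat = n.toNat / 16 := by omega
    have hform := pv_hexD_succ n.toNat hnz
    have hev : (pvHexD (n.toNat / 16)).length % 2 = 0 := by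
      have : (pvHexD n.toNat).length = (pvHexD (n.toNat / 16)).length + 1 := by
        rw [hform]; simp
      omega
    have hlt16 : (((n.toNat / 16 : Nat) : Int)).toNat < n.toNat + 1 := by
      have := Nat.div_lt_self (Nat.pos_of_ne_zero hnz) (by omega : 1 < 16)
      omega
    rw [pv_byteLoop_eq _ _ _ hlt16 (by rw [hfn]; exact hev)]
    rw [hfn, pv_slices_rotate]
    have hC : pvChunksD (pvHexD n.toNat)
        = pvChunksD (pvHexD (n.toNat / 16)) ++ [[Nat.digitChar (n.toNat % 16)]] := by
      rw [hform, pv_chunksD_append_even _ _ hev]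
      simp [pvChunksD]
    rw [hC, List.getLast?_concat, List.dropLast_concat]
    simp
  · have hev : (pvHexD n.toNat).length % 2 = 0 := by omega
    rw [if_neg (by intro hx; exact hodd (by exact_mod_cast hx)),
      if_neg (by intro hx; exact hodd (by exact_mod_cast hx))]
    rw [pv_byteLoop_eq _ _ _ (by omega) hev]
    rw [pv_slices_rotate]
    simp only [List.nil_append]
    have hcne := pv_chunksD_ne_nil _ hne
    have hg : (pvChunksD (pvHexD n.toNat)).getLast?.getD []
        = (pvChunksD (pvHexD n.toNat)).getLast hcne := by
      rw [List.getLast?_eq_some_getLast hcne]; rfl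
    rw [hg]
    have hsplit := List.dropLast_append_getLast hcne
    conv_lhs => rw [← hsplit]
    rw [List.reverse_append]
    simp

theorem pv_B_empty (n : Int) (h0 : n.toNat = 0) : decimal_to_hex_16_alt n = "" := by
  have hnp : ¬ 0 < n := by omega
  unfold decimal_to_hex_16_alt
  dsimp only
  rw [h0]
  rw [show pvCountLoop (0 + 1) n 0 = 0 by rw [pvCountLoop, if_neg hnp]]
  rw [if_neg (by decide), if_neg (by decide)]
  rw [show pvByteLoop (0 + 1) n [] = [] by rw [pvByteLoop, if_neg hnp]]
  rw [pv_slices_rotate]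
  simp [PySem.Chars.join_nil]

theorem pv_pyRange2_nil (a b : Int) (h : b ≤ a) : PySem.List.pyRange a b 2 = [] := by
  rw [PySem.List.pyRange_of_pos _ _ (by norm_num)]
  simp [show ¬ a < b by omega]

theorem pv_pyRange2_cons (a b : Int) (h : a < b) :
    PySem.List.pyRange a b 2 = a :: PySem.List.pyRange (a + 2) b 2 := by
  rw [PySem.List.pyRange_of_pos _ _ (by norm_num), PySem.List.pyRange_of_pos _ _ (by norm_num)]
  have hc : (if a < b then ((b - a + 2 - 1) / 2).toNat else 0)
      = (if a + 2 < b then ((b - (a + 2) + 2 - 1) / 2).toNat else 0) + 1 := by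
    split_ifs <;> omega
  rw [hc, List.range_succ_eq_map]
  simp [List.map_map, Function.comp]
  intro k _
  ring

theorem pv_chunksD_cons (t : List Char) (h : t ≠ []) :
    pvChunksD t = t.take 2 :: pvChunksD (t.drop 2) := by
  match t with
  | [a] => simp [pvChunksD]
  | a :: b :: r => simp [pvChunksD]

theorem pv_insert_space_go (s : List Char) : ∀ (k a : Nat) (acc : List Char),
    s.length - a ≤ k → a < s.length →
    (PySem.List.pyRange (a : Int) (s.length : Int) 2).foldl
      (fun acc i =>
        let acc := acc ++ PySem.List.slice s (some i) (some (i + 2))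
        if i + 2 < (s.length : Int) then acc ++ [' '] else acc) acc
      = acc ++ PySem.Chars.join [' '] (pvChunksD (s.drop a)) := by
  intro k
  induction k with
  | zero => intro a acc hk ha; omega
  | succ k ih =>
    intro a acc hk ha
    rw [pv_pyRange2_cons _ _ (by omega), List.foldl_cons]
    have hsl : PySem.List.slice s (some (a : Int)) (some ((a : Int) + 2)) = (s.drop a).take 2 := by
      have := PySem.List.slice_natCast_add s a 2
      simpa using this
    have hdnn : s.drop a ≠ [] := by rw [Ne, List.drop_eq_nil_iff]; omega
    have hchk := pv_chunksD_cons (s.drop a) hdnn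
    have hdd : (s.drop a).drop 2 = s.drop (a + 2) := by
      rw [List.drop_drop]
    by_cases hlt : a + 2 < s.length
    · have hcond : ((a : Int) + 2 < (s.length : Int)) := by omega
      simp only [hsl, hcond, if_true]
      rw [show ((a : Int) + 2) = ((a + 2 : Nat) : Int) by push_cast; ring,
        ih (a + 2) _ (by omega) (by omega)]
      have hd2 : s.drop (a + 2) ≠ [] := by rw [Ne, List.drop_eq_nil_iff]; omega
      obtain ⟨q, rest, hqr⟩ : ∃ q rest, pvChunksD (s.drop (a + 2)) = q :: rest := by
        rcases hx : pvChunksD (s.drop (a + 2)) with _ | ⟨q, rest⟩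
        · exact absurd hx (pv_chunksD_ne_nil _ hd2)
        · exact ⟨q, rest, rfl⟩
      rw [hchk, hdd, hqr, PySem.Chars.join_cons_cons]
      simp [List.append_assoc]
    · have hcond : ¬ ((a : Int) + 2 < (s.length : Int)) := by omega
      simp only [hsl, hcond, if_false]
      rw [pv_pyRange2_nil _ _ (by omega), List.foldl_nil]
      have hd2 : s.drop (a + 2) = [] := List.drop_eq_nil_iff.mpr (by omega)
      rw [hchk, hdd, hd2]
      simp [pvChunksD, PySem.Chars.join_singleton]

theorem pv_insert_space_eq (s : List Char) :
    pvInsertSpace s = PySem.Chars.join [' '] (pvChunksD s) := by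
  rcases hs : s with _ | ⟨c, t⟩
  · simp [pvInsertSpace, pvChunksD, PySem.Chars.join_nil, pv_pyRange2_nil 0 0 (le_refl 0)]
  · rw [← hs]
    have hlen : 0 < s.length := by rw [hs]; simp
    unfold pvInsertSpace
    have := pv_insert_space_go s s.length 0 [] (by omega) (by omega)
    simpa using this

-- proof-only helpers: a direct recursive model of str.split(" ")
def pvMySplit : List Char → List Char → List (List Char)
  | cur, [] => [cur.reverse]
  | cur, c :: r => if c = ' ' then cur.reverse :: pvMySplit [] r else pvMySplit (c :: cur) r

theorem pv_go_eq : ∀ (fuel : Nat) (l cur : List Char) (acc : List (List Char)),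
    l.length < fuel →
    PySem.Chars.splitOn.go [' '] fuel l cur acc = acc.reverse ++ pvMySplit cur l := by
  intro fuel
  induction fuel with
  | zero => intro l cur acc h; omega
  | succ f ih =>
    intro l cur acc h
    match l with
    | [] => simp [PySem.Chars.splitOn.go, pvMySplit]
    | c :: rest =>
      rw [PySem.Chars.splitOn.go]
      by_cases hc : c = ' '
      · subst hc
        rw [if_pos (by simp [List.isPrefixOf])]
        simp only [List.length_cons] at h
        rw [ih _ _ _ (by simp; omega)]
        simp [pvMySplit]
      · rw [if_neg (by simp [List.isPrefixOf]; exact fun hmm => hc hmm.symm)]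
        simp only [List.length_cons] at h
        rw [ih _ _ _ (by omega)]
        simp [pvMySplit, hc]

theorem pv_split_eq_mySplit (s : List Char) :
    PySem.Chars.split? s [' '] = some (pvMySplit [] s) := by
  have h1 : PySem.Chars.split? s [' '] = some (PySem.Chars.splitOn s [' ']) := by
    simp [PySem.Chars.split?, List.isEmpty]
  rw [h1]
  unfold PySem.Chars.splitOn
  rw [pv_go_eq _ _ _ _ (by omega)]
  simp

theorem pv_mySplit_append (p : List Char) (hp : ∀ c ∈ p, c ≠ ' ') :
    ∀ cur l, pvMySplit cur (p ++ l) = pvMySplit (p.reverse ++ cur) l := by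
  induction p with
  | nil => intro cur l; simp
  | cons c p' ih =>
    intro cur l
    have hc : c ≠ ' ' := hp c (by simp)
    simp only [List.cons_append, pvMySplit, if_neg hc]
    rw [ih (fun d hd => hp d (by simp [hd])) (c :: cur) l]
    simp

theorem pv_mySplit_join : ∀ (parts : List (List Char)), parts ≠ [] →
    (∀ p ∈ parts, ∀ c ∈ p, c ≠ ' ') →
    pvMySplit [] (PySem.Chars.join [' '] parts) = parts := by
  intro parts
  induction parts with
  | nil => intro h; exact absurd rfl h
  | cons p rest ih =>
    intro _ hfree
    rcases rest with _ | ⟨q, rest'⟩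
    · rw [PySem.Chars.join_singleton]
      have h2 := pv_mySplit_append p (hfree p (by simp)) [] []
      simpa [pvMySplit] using h2
    · rw [PySem.Chars.join_cons_cons]
      have h2 := pv_mySplit_append p (hfree p (by simp)) []
        (' ' :: PySem.Chars.join [' '] (q :: rest'))
      rw [show p ++ [' '] ++ PySem.Chars.join [' '] (q :: rest')
          = p ++ (' ' :: PySem.Chars.join [' '] (q :: rest')) by simp]
      rw [h2]
      simp [pvMySplit, ih (by simp) (fun r hr => hfree r (by simp [hr]))]

theorem pv_split_join (parts : List (List Char)) (hne : parts ≠ [])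
    (hfree : ∀ p ∈ parts, ∀ c ∈ p, c ≠ ' ') :
    PySem.Chars.split? (PySem.Chars.join [' '] parts) [' '] = some parts := by
  rw [pv_split_eq_mySplit, pv_mySplit_join parts hne hfree]

theorem pv_digitChar_ne_space (n : Nat) : Nat.digitChar n ≠ ' ' := by
  by_cases h : n < 16
  · interval_cases n <;> decide
  · unfold Nat.digitChar
    rw [if_neg (by omega), if_neg (by omega), if_neg (by omega), if_neg (by omega),
      if_neg (by omega), if_neg (by omega), if_neg (by omega), if_neg (by omega),
      if_neg (by omega), if_neg (by omega), if_neg (by omega), if_neg (by omega),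
      if_neg (by omega), if_neg (by omega), if_neg (by omega), if_neg (by omega)]
    decide

theorem pv_hexDigits_no_space (fuel : Nat) : ∀ (m : Nat), ∀ c ∈ pvHexDigitsD fuel m, c ≠ ' ' := by
  induction fuel with
  | zero => intro m c hc; simp [pvHexDigitsD] at hc
  | succ f ih =>
    intro m c hc
    by_cases hm : m = 0
    · simp [pvHexDigitsD, hm] at hc
    · rw [pvHexDigitsD, if_neg hm] at hc
      rcases List.mem_append.mp hc with h1 | h2
      · exact ih _ c h1
      · simp at h2; rw [h2]; exact pv_digitChar_ne_space _

theorem pv_chunks_no_space : ∀ (h : List Char), (∀ c ∈ h, c ≠ ' ') →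
    ∀ p ∈ pvChunksD h, ∀ c ∈ p, c ≠ ' ' := by
  intro h
  induction h using pvChunksD.induct with
  | case1 => intro _ p hp; simp [pvChunksD] at hp
  | case2 a =>
    intro hfree p hp c hc
    simp [pvChunksD] at hp
    subst hp
    simp at hc
    subst hc
    exact hfree c (by simp)
  | case3 a b t ih =>
    intro hfree p hp c hc
    simp only [pvChunksD, List.mem_cons] at hp
    rcases hp with hp | hp
    · subst hp
      simp at hc
      rcases hc with hc | hc <;> (subst hc; exact hfree _ (by simp))
    · exact ih (fun d hd => hfree d (by simp [hd])) p hp c hc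

def pvNoD (c : List (List Char)) : Prop :=
  ∀ i j : Nat, i < j → j + 1 < c.length → getElem? c i = c.getLast? → getElem? c j = c.getLast?

theorem pv_dropWhile_all (g : List Char) : ∀ (t : List (List Char)),
    ((t.dropWhile (· != g)).any (· != g) = false) →
    ∀ i j : Nat, i < j → ∀ (hi : i < t.length) (hj : j < t.length),
      t[i] = g → t[j] = g := by
  intro t
  induction t with
  | nil => intro _ i j _ _ hj; simp at hj
  | cons x r ih =>
    intro h i j hij hi hj hig
    by_cases hx : x = g
    · have hstop : (x :: r).dropWhile (· != g) = x :: r := by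
        rw [List.dropWhile_cons, if_neg (by simp [hx])]
      rw [hstop] at h
      simp only [List.any_eq_false, bne_iff_ne, not_not] at h
      exact h _ (List.getElem_mem _)
    · have hgo : (x :: r).dropWhile (· != g) = r.dropWhile (· != g) := by
        rw [List.dropWhile_cons, if_pos (by simp [hx])]
      rw [hgo] at h
      match i, j with
      | 0, _ => exact absurd hig hx
      | i' + 1, j' + 1 =>
        have := ih h i' j' (by omega) (by simpa using hi) (by simpa using hj)
          (by simpa using hig)
        simpa using this

theorem pv_noD_of_check_false (c : List (List Char)) (h : pvDCheck c = false) : pvNoD c := by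
  intro i j hij hj hi
  have hcne : c ≠ [] := by intro h0; subst h0; simp at hj
  have hg : c.getLast?.getD [] = c.getLast hcne := by
    rw [List.getLast?_eq_some_getLast hcne]; rfl
  unfold pvDCheck at h
  rw [hg] at h
  have hil : i < c.dropLast.length := by simp [List.length_dropLast]; omega
  have hjl : j < c.dropLast.length := by simp [List.length_dropLast]; omega
  have hsome := List.getElem?_eq_getElem (l := c) (i := i) (by omega : i < c.length)
  rw [hsome, List.getLast?_eq_some_getLast hcne] at hi
  have hi' : c.dropLast[i]'hil = c.getLast hcne := by
    rw [List.getElem_dropLast]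
    exact Option.some.inj hi
  have hres := pv_dropWhile_all (c.getLast hcne) c.dropLast h i j hij hil hjl hi'
  rw [List.getElem_dropLast] at hres
  rw [List.getElem?_eq_getElem (l := c) (i := j) (by omega : j < c.length), hres,
    List.getLast?_eq_some_getLast hcne]

theorem pv_dropLast_cons_all (l : List (List Char)) (v : List Char) (h : ∀ y ∈ l, y = v) :
    (v :: l).dropLast = l := by
  induction l with
  | nil => simp
  | cons y u ih =>
    have hy : y = v := h y (by simp)
    subst hy
    rw [List.dropLast_cons₂, ih (fun z hz => h z (by simp [hz]))]

theorem pv_erase_getLast : ∀ (c : List (List Char)) (hne : c ≠ []), pvNoD c →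
    c.erase (c.getLast hne) = c.dropLast := by
  intro c
  induction c with
  | nil => intro hne; exact absurd rfl hne
  | cons x t ih =>
    intro hne hnod
    by_cases htnil : t = []
    · subst htnil; simp
    · have htne : t ≠ [] := htnil
      have hlast : (x :: t).getLast hne = t.getLast htne := List.getLast_cons htne
      have hgl? : (x :: t).getLast? = some ((x :: t).getLast hne) :=
        List.getLast?_eq_some_getLast hne
      by_cases hx : x = (x :: t).getLast hne
      · have hall : ∀ z ∈ x :: t, z = (x :: t).getLast hne := by
          intro z hz
          obtain ⟨k, hk, hzk⟩ := List.getElem_of_mem hz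
          by_cases hkl : k + 1 < (x :: t).length
          · rcases Nat.eq_zero_or_pos k with hk0 | hkpos
            · subst hk0; rw [← hzk]; simpa using hx
            · have := hnod 0 k hkpos hkl (by rw [hgl?]; simpa using congrArg some hx)
              rw [hgl?] at this
              rw [List.getElem?_eq_getElem hk, hzk] at this
              exact Option.some.inj this
          · have hk1 : k = (x :: t).length - 1 := by omega
            rw [← hzk]
            subst hk1
            exact (List.getLast_eq_getElem hne).symm
        have herase : (x :: t).erase ((x :: t).getLast hne) = t := by
          conv_lhs => rw [← hx]
          exact List.erase_cons_head x t
        have hdrop : (x :: t).dropLast = t :=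
          pv_dropLast_cons_all t x (fun z hz => (hall z (by simp [hz])).trans hx.symm)
        rw [herase, hdrop]
      · rw [List.erase_cons_tail (by simp; exact fun hmm => hx hmm)]
        rw [List.dropLast_cons_of_ne_nil htne]
        have hnodt : pvNoD t := by
          intro i j hij hj hi
          have hglt : (x :: t).getLast? = t.getLast? := by
            rw [hgl?, hlast, List.getLast?_eq_some_getLast htne]
          have := hnod (i + 1) (j + 1) (by omega) (by simp; omega)
            (by simpa [hglt] using hi)
          simpa [hglt] using this
        rw [hlast, ih htne hnodt]

theorem pv_changepos_eq (c : List (List Char)) (hcne : c ≠ [])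
    (hfree : ∀ p ∈ c, ∀ d ∈ p, d ≠ ' ') :
    pvChangepos (PySem.Chars.join [' '] c)
      = PySem.Chars.join [' '] (c.getLast hcne :: c.erase (c.getLast hcne)) := by
  unfold pvChangepos
  rw [pv_split_join c hcne hfree]
  dsimp only []
  have hlen1 : ((c.length : Int) - 1) = ((c.length - 1 : Nat) : Int) := by
    have : 0 < c.length := List.length_pos_iff.mpr hcne
    omega
  rw [hlen1, PySem.List.pyGet?_natCast, ← List.getLast?_eq_getElem?,
    List.getLast?_eq_some_getLast hcne]
  simp only [Option.getD_some]
  rw [PySem.List.remove?_eq_some_erase c _ (List.getLast_mem hcne)]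
  simp only [PySem.List.insert_zero]

theorem pv_A_form (n : Int) (hne : pvHexDigitsD (n.toNat + 1) n.toNat ≠ []) :
    decimal_to_hex_16 n = String.ofList (PySem.Chars.join [' ']
      (((pvChunksD (pvHexDigitsD (n.toNat + 1) n.toNat)).getLast?.getD []) ::
        (pvChunksD (pvHexDigitsD (n.toNat + 1) n.toNat)).erase
          ((pvChunksD (pvHexDigitsD (n.toNat + 1) n.toNat)).getLast?.getD []))) := by
  have hcne := pv_chunksD_ne_nil _ hne
  have hg : (pvChunksD (pvHexDigitsD (n.toNat + 1) n.toNat)).getLast?.getD []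
      = (pvChunksD (pvHexDigitsD (n.toNat + 1) n.toNat)).getLast hcne := by
    rw [List.getLast?_eq_some_getLast hcne]; rfl
  rw [hg]
  unfold decimal_to_hex_16
  rw [pv_loopA_eq _ _ _ (by omega), List.append_nil, pv_insert_space_eq,
    pv_changepos_eq _ hcne
      (pv_chunks_no_space _ (fun d hd => pv_hexDigits_no_space _ _ d hd))]

theorem pv_hexD_loop (n : Int) :
    pvHexD n.toNat = pvHexDigitsD (n.toNat + 1) n.toNat :=
  pv_hexD_eq (n.toNat + 1) n.toNat (by omega)

theorem pv_key (n : Int) (hD : ¬ D_decimal_to_hex_16 n) :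
    decimal_to_hex_16 n = decimal_to_hex_16_alt n := by
  rcases eq_or_ne (pvHexDigitsD (n.toNat + 1) n.toNat) [] with hemp | hne
  · have h0 : n.toNat = 0 := by
      by_contra h0
      rw [pvHexDigitsD, if_neg h0] at hemp
      simp at hemp
    rw [pv_B_empty n h0]
    unfold decimal_to_hex_16
    rw [pv_loopA_eq _ _ _ (by omega), List.append_nil, hemp]
    decide
  · rw [pv_A_form n hne, pv_B_form n hne]
    have hcne := pv_chunksD_ne_nil _ hne
    have hg : (pvChunksD (pvHexDigitsD (n.toNat + 1) n.toNat)).getLast?.getD []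
        = (pvChunksD (pvHexDigitsD (n.toNat + 1) n.toNat)).getLast hcne := by
      rw [List.getLast?_eq_some_getLast hcne]; rfl
    have hnod : pvNoD (pvChunksD (pvHexDigitsD (n.toNat + 1) n.toNat)) := by
      apply pv_noD_of_check_false
      unfold D_decimal_to_hex_16 at hD
      rw [pv_hexD_loop n] at hD
      exact Bool.not_eq_true _ ▸ (by simpa using hD)
    rw [hg, pv_erase_getLast _ hcne hnod]

theorem pv_eq_cons_dropLast : ∀ (l : List (List Char)) (v : List Char),
    l = v :: l.dropLast → ∀ y ∈ l, y = v := by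
  intro l
  induction l with
  | nil => intro v h; cases h
  | cons z r ih =>
    intro v h y hy
    have hz : z = v := (List.cons.injEq _ _ _ _ ▸ h).1
    have hr : r = (z :: r).dropLast := (List.cons.injEq _ _ _ _ ▸ h).2
    rcases List.mem_cons.mp hy with hy | hy
    · exact hy.trans hz
    · rcases eq_or_ne r [] with hr0 | hr0
      · subst hr0; simp at hy
      · have hdl : (z :: r).dropLast = z :: r.dropLast := List.dropLast_cons_of_ne_nil hr0
        rw [hdl, hz] at hr
        exact ih v hr y hy

theorem pv_erase_ne : ∀ (c : List (List Char)) (hne : c ≠ []), pvDCheck c = true →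
    c.erase (c.getLast hne) ≠ c.dropLast := by
  intro c
  induction c with
  | nil => intro hne; exact absurd rfl hne
  | cons x t ih =>
    intro hne hD
    by_cases htnil : t = []
    · subst htnil
      simp [pvDCheck] at hD
    · have htne : t ≠ [] := htnil
      have hlast : (x :: t).getLast hne = t.getLast htne := List.getLast_cons htne
      have hg : (x :: t).getLast?.getD [] = (x :: t).getLast hne := by
        rw [List.getLast?_eq_some_getLast hne]; rfl
      have hdl : (x :: t).dropLast = x :: t.dropLast := List.dropLast_cons_of_ne_nil htne
      by_cases hx : x = (x :: t).getLast hne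
      · -- equality would force the whole list constant, but D_ found a different group
        have hstop : (x :: t).dropLast.dropWhile (· != (x :: t).getLast?.getD [])
            = (x :: t).dropLast := by
          rw [hdl, List.dropWhile_cons, if_neg (by rw [hg, ← hx]; simp)]
        unfold pvDCheck at hD
        rw [hstop] at hD
        simp only [List.any_eq_true, bne_iff_ne] at hD
        obtain ⟨y, hy, hyne⟩ := hD
        rw [hg] at hyne
        intro heq
        have herase : (x :: t).erase ((x :: t).getLast hne) = t := by
          conv_lhs => rw [← hx]
          exact List.erase_cons_head x t
        rw [herase, hdl] at heq
        have hally : ∀ z ∈ x :: t.dropLast, z = x :=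
          pv_eq_cons_dropLast (x :: t.dropLast) x (by conv_lhs => rw [heq])
        exact hyne ((hally y (hdl ▸ hy)).trans hx)
      · have hDt : pvDCheck t = true := by
          unfold pvDCheck at hD ⊢
          rw [hdl, List.dropWhile_cons,
            if_pos (by rw [hg]; simpa using fun hmm => hx hmm)] at hD
          have hgt : t.getLast?.getD [] = (x :: t).getLast?.getD [] := by
            rw [List.getLast?_eq_some_getLast htne, List.getLast?_eq_some_getLast hne, hlast]
          rw [hgt]
          exact hD
        have hrec := ih htne hDt
        rw [List.erase_cons_tail (by simp; exact fun hmm => hx hmm), hdl, hlast]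
        intro heq
        exact hrec ((List.cons.injEq _ _ _ _ ▸ heq).2)

theorem pv_join_inj (l1 l2 : List (List Char)) (h1 : l1 ≠ []) (h2 : l2 ≠ [])
    (f1 : ∀ p ∈ l1, ∀ c ∈ p, c ≠ ' ') (f2 : ∀ p ∈ l2, ∀ c ∈ p, c ≠ ' ')
    (h : PySem.Chars.join [' '] l1 = PySem.Chars.join [' '] l2) : l1 = l2 := by
  rw [← pv_mySplit_join l1 h1 f1, ← pv_mySplit_join l2 h2 f2, h]

theorem pv_key_ne (n : Int) (hD : D_decimal_to_hex_16 n) :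
    decimal_to_hex_16 n ≠ decimal_to_hex_16_alt n := by
  have hDc : pvDCheck (pvChunksD (pvHexDigitsD (n.toNat + 1) n.toNat)) = true := by
    unfold D_decimal_to_hex_16 at hD
    rw [pv_hexD_loop n] at hD
    exact hD
  have hne : pvHexDigitsD (n.toNat + 1) n.toNat ≠ [] := by
    intro h0
    rw [h0] at hDc
    simp [pvChunksD, pvDCheck] at hDc
  have hcne : pvChunksD (pvHexDigitsD (n.toNat + 1) n.toNat) ≠ [] := pv_chunksD_ne_nil _ hne
  have hfree : ∀ p ∈ pvChunksD (pvHexDigitsD (n.toNat + 1) n.toNat), ∀ d ∈ p, d ≠ ' ' :=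
    pv_chunks_no_space _ (fun d hd => pv_hexDigits_no_space _ _ d hd)
  have hg : (pvChunksD (pvHexDigitsD (n.toNat + 1) n.toNat)).getLast?.getD []
      = (pvChunksD (pvHexDigitsD (n.toNat + 1) n.toNat)).getLast hcne := by
    rw [List.getLast?_eq_some_getLast hcne]; rfl
  rw [pv_A_form n hne, pv_B_form n hne, hg]
  intro heq
  have hl := congrArg String.toList heq
  simp only [String.toList_ofList] at hl
  have hlists := pv_join_inj _ _ (by simp) (by simp)
    (by
      intro p hp
      rcases List.mem_cons.mp hp with hp | hp
      · exact hp ▸ hfree _ (List.getLast_mem hcne)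
      · exact hfree _ (List.mem_of_mem_erase hp))
    (by
      intro p hp
      rcases List.mem_cons.mp hp with hp | hp
      · exact hp ▸ hfree _ (List.getLast_mem hcne)
      · exact hfree _ (List.dropLast_subset _ hp))
    hl
  exact pv_erase_ne _ hcne hDc ((List.cons.injEq _ _ _ _ ▸ hlists).2)

-- ===== VERDICT (by name: the statement is the Claim_ definition above) =====
theorem decimal_to_hex_16_spec : Claim_unchanged_decimal_to_hex_16 := by
  intro n _ hD
  exact (pv_key n hD).symm ▸ rfl

theorem decimal_to_hex_16_changed : Claim_changed_decimal_to_hex_16 := by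
  unfold Claim_changed_decimal_to_hex_16; decide

theorem decimal_to_hex_16_tight : Claim_exact_decimal_to_hex_16 := by
  intro n _ hD
  exact pv_key_ne n hD
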